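-- pv_equiv track=rewrite | github.com/parhamf6/python-exercises | questions/LeetCode/27 Remove Element.py | removeElement
-- ===== SOURCE A (Python) =====
-- def removeElement(nums, val):
--     """
--     :type nums: List[int]
--     :type val: int
--     :rtype: int
--     """
--     ir = 0
--     iw = 0
--     k = 0
--     while (ir < len(nums)):
--         if nums[ir]!=val:
--             k+=1
--             nums[iw]=nums[ir]
--             iw +=1
--         ir+=1
--     return k
-- ===== SOURCE B (Python) =====
-- def removeElement(nums, val):
--     # Two-pass version: filter first, then write the kept elements back
--     # into the front of nums (same observable mutation as A: front
--     # positions overwritten in order, tail untouched). Returns the count.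
--     kept = [x for x in nums if x != val]
--     for i, v in enumerate(kept):
--         nums[i] = v
--     return len(kept)
-- ===== Notes on version B (the rewrite author's own statement) =====
-- stated objective: simpler
-- what changed: A's single fused filter-and-compact while loop (read/write pointers and a counter) is replaced by two separate passes: build the filtered list with a comprehension, then write it back into the front of nums and return its length.
import Mathlib
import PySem

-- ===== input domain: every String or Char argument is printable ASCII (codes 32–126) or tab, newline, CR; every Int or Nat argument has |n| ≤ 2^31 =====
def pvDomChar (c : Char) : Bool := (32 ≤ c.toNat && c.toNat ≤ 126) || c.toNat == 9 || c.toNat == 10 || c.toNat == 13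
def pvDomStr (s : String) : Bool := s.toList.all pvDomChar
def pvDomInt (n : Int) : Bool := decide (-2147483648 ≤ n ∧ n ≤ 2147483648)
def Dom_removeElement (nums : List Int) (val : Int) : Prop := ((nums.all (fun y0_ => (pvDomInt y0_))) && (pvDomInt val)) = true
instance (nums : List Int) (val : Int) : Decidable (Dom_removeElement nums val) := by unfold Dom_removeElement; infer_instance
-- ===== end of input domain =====

-- B replaces A's fused filter-and-compact while loop by two passes (filter, then write-back);
-- the proved equivalence is about the RETURN value only (both perform the same front-overwrite mutation in Python).


-- ===== PORT A =====
-- A's while loop: read pointer ir, write pointer iw, counter k; nums is mutated in place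
-- (the front is overwritten with kept elements). The nonnegative Python counters ir, iw
-- are represented as Nat; the mutated list is threaded as loop state.
def removeElementLoop (val : Int) (nums : List Int) (ir iw : Nat) (k : Int) : Int :=
  if h : ir < nums.length then
    if nums[ir] != val then
      removeElementLoop val (nums.set iw nums[ir]) (ir + 1) (iw + 1) (k + 1)
    else
      removeElementLoop val nums (ir + 1) iw k
  else
    k
termination_by nums.length - ir
decreasing_by
  · simp [List.length_set]; omega
  · omega

def removeElement (nums : List Int) (val : Int) : Int :=
  removeElementLoop val nums 0 0 0

-- ===== PORT B =====
-- B: kept = [x for x in nums if x != val]; (write-back loop mutates nums only); return len(kept)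
def removeElement_alt (nums : List Int) (val : Int) : Int :=
  ((nums.filter (fun x => x != val)).length : Int)

-- ===== PRECONDITION & SPEC =====
def Spec_removeElement (nums : List Int) (val : Int) (out : Int) : Prop := out = removeElement_alt nums val
instance (nums : List Int) (val : Int) (out : Int) : Decidable (Spec_removeElement nums val out) := by unfold Spec_removeElement; infer_instance

-- ===== CLAIM (what is proved, stated in full; the proofs are below) =====
def Claim_equal_removeElement : Prop := ∀ (nums : List Int) (val : Int), Dom_removeElement nums val → Spec_removeElement nums val (removeElement nums val)

-- ===== LEMMAS AND PROOFS =====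

-- Loop invariant: with iw ≤ ir, the loop returns k plus the number of kept elements
-- in the unprocessed suffix (which the write at iw ≤ ir never touches).
theorem removeElementLoop_eq (val : Int) :
    ∀ (n : Nat) (nums : List Int) (ir iw : Nat) (k : Int),
      nums.length - ir ≤ n → iw ≤ ir →
      removeElementLoop val nums ir iw k
        = k + (((nums.drop ir).filter (fun x => x != val)).length : Int) := by
  intro n
  induction n with
  | zero =>
    intro nums ir iw k hn hiw
    have hge : nums.length ≤ ir := by omega
    rw [removeElementLoop]
    simp [Nat.not_lt.mpr hge, List.drop_eq_nil_of_le hge]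
  | succ m ih =>
    intro nums ir iw k hn hiw
    rw [removeElementLoop]
    by_cases h : ir < nums.length
    · have hdrop : nums.drop ir = nums[ir] :: nums.drop (ir + 1) :=
        List.drop_eq_getElem_cons h
      by_cases hv : nums[ir] != val
      · have hset : (nums.set iw nums[ir]).drop (ir + 1) = nums.drop (ir + 1) := by
          rw [List.drop_set]
          simp
          omega
        rw [dif_pos h, if_pos hv,
          ih (nums.set iw nums[ir]) (ir + 1) (iw + 1) (k + 1)
            (by simpa [List.length_set] using (by omega : nums.length - (ir + 1) ≤ m))
            (by omega)]
        rw [hset, hdrop]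
        simp only [List.filter_cons]
        rw [if_pos hv]
        simp only [List.length_cons]
        push_cast
        ring
      · rw [dif_pos h, if_neg hv,
          ih nums (ir + 1) iw k (by omega) (by omega)]
        rw [hdrop]
        simp only [List.filter_cons]
        rw [if_neg hv]
    · have hge : nums.length ≤ ir := by omega
      simp [h, List.drop_eq_nil_of_le hge]

-- ===== VERDICT (by name: the statement is the Claim_ definition above) =====
theorem removeElement_spec : Claim_equal_removeElement := by
  intro nums val _
  unfold Spec_removeElement removeElement removeElement_alt
  rw [removeElementLoop_eq val nums.length nums 0 0 0 (by omega) (by omega)]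
  simp
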